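-- pv_equiv track=rewrite | github.com/proxophy/AdventOfCode | aoc2025/day11.py | rec
-- ===== SOURCE A (Python) =====
-- def rec(dp, in_edges, start, u) -> int:
--     if u == start:
--         dp[u] = 1
--         return 1
--     elif len(in_edges[u]) == 0:
--         dp[u] = 0
--         return 0
--     if dp[u] != -1:
--         return dp[u]
--
--     res = 0
--     for v in in_edges[u]:
--         res += rec(dp, in_edges, start, v)
--     dp[u] = res
--     return res
-- ===== SOURCE B (Python) =====
-- def rec(dp, in_edges, start, u) -> int:
--     # Round-based fixed-point iteration (Bellman-Ford style) over a fresh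
--     # value table instead of recursion with an in-place memo; dp is only read.
--     def settled(v):
--         if v == start:
--             return 1
--         es = in_edges.get(v, ())
--         if len(es) == 0:
--             return 0
--         w = dp.get(v, 0)
--         return w if w != -1 else None
--
--     val = {}
--     for _ in range(len(in_edges)):
--         for node, es in in_edges.items():
--             if node in val or settled(node) is not None:
--                 continue
--             ch = [val[v] if v in val else settled(v) for v in es]
--             if None not in ch:
--                 val[node] = sum(ch)
--     if u == start:
--         return 1
--     es = in_edges[u]
--     if len(es) == 0:
--         return 0
--     w = dp[u]
--     if w != -1:
--         return w
--     return val[u]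
-- ===== Notes on version B (the rewrite author's own statement) =====
-- stated objective: alternative
-- what changed: Replaces A's memoised recursion that writes into the caller's dp in place with an iterative Bellman-Ford-style fixed point: len(in_edges) rounds over in_edges.items() fill a fresh value table from already-determined nodes (start/leaf/memoised via a settled() probe), and dp is only read; it trades A's linear recursion for quadratic rounds but never overflows the call stack.
import Mathlib
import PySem

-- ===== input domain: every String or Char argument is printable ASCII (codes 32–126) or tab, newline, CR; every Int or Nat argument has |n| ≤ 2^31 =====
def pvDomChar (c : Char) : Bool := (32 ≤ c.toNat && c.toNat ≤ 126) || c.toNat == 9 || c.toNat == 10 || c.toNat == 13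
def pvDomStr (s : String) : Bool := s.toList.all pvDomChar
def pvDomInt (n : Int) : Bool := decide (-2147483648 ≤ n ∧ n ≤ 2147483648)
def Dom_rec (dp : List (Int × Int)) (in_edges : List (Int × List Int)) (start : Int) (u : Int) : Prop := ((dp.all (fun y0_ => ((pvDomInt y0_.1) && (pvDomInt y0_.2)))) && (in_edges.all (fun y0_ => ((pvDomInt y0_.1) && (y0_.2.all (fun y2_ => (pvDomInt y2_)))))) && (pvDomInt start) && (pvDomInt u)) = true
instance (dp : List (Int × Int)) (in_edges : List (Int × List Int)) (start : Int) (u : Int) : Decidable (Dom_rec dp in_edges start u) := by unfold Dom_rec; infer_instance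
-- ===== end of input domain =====

-- B replaces A's recursion-with-in-place-memo by round-based fixed-point iteration over a
-- fresh value table (dp is only read); equivalence is about the RETURN value only — A
-- memoises into the caller's dp in place, B does not mutate dp.

-- ===== PORT A =====
-- Fuel-indexed transliteration of A's recursion; the fuel only bounds the recursion
-- depth and on inputs admitted by Pre_rec it is never exhausted (proved below); the
-- fuel-out branch returns a junk value only reachable outside Pre_rec.
def recA (ie : List (Int × List Int)) (start : Int) :
    Nat → PySem.Dict Int Int → Int → PySem.Dict Int Int × Int
  | 0, d, _ => (d, 0)
  | fuel+1, d, u =>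
    if u = start then (d.insert u 1, 1)
    else
      match (PySem.Dict.ofList ie).get? u with
      | none => (d, 0)                           -- Python: KeyError (outside Pre_rec)
      | some es =>
        if es.length = 0 then (d.insert u 0, 0)
        else
          match d.get? u with
          | none => (d, 0)                       -- Python: KeyError (outside Pre_rec)
          | some w =>
            if w ≠ -1 then (d, w)
            else
              let r := es.foldl
                (fun (p : PySem.Dict Int Int × Int) v =>
                  let q := recA ie start fuel p.1 v
                  (q.1, p.2 + q.2)) (d, 0)
              (r.1.insert u r.2, r.2)

def rec (dp : List (Int × Int)) (in_edges : List (Int × List Int)) (start : Int) (u : Int) : Int :=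
  (recA in_edges start (in_edges.length + 1) (PySem.Dict.ofList dp) u).2

-- ===== PORT B =====
def settledB (dp : List (Int × Int)) (ie : List (Int × List Int)) (start v : Int) : Option Int :=
  if v = start then some 1
  else if ((PySem.Dict.ofList ie).getD v []).length = 0 then some 0
  else if (PySem.Dict.ofList dp).getD v 0 ≠ -1 then some ((PySem.Dict.ofList dp).getD v 0)
  else none

def knownB (dp : List (Int × Int)) (ie : List (Int × List Int)) (start : Int)
    (val : PySem.Dict Int Int) (v : Int) : Option Int :=
  if val.contains v then val.get? v else settledB dp ie start v

-- one round: 'for node, es in in_edges.items(): …'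
def roundB (dp : List (Int × Int)) (ie : List (Int × List Int)) (start : Int)
    (val : PySem.Dict Int Int) : PySem.Dict Int Int :=
  (PySem.Dict.ofList ie).items.foldl
    (fun val p =>
      if val.contains p.1 || (settledB dp ie start p.1).isSome then val
      else
        let ch := p.2.map (knownB dp ie start val)
        if ch.contains none then val
        else val.insert p.1 (ch.filterMap id).sum) val

def rec_alt (dp : List (Int × Int)) (in_edges : List (Int × List Int)) (start : Int) (u : Int) : Int :=
  let val := (List.range (PySem.Dict.ofList in_edges).size).foldl
    (fun val _ => roundB dp in_edges start val) PySem.Dict.empty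
  if u = start then 1
  else
    match (PySem.Dict.ofList in_edges).get? u with
    | none => 0                                  -- Python: KeyError (outside Pre_rec)
    | some es =>
      if es.length = 0 then 0
      else
        match (PySem.Dict.ofList dp).get? u with
        | none => 0                              -- Python: KeyError (outside Pre_rec)
        | some w =>
          if w ≠ -1 then w
          else ((val.get? u).getD 0)             -- Python: val[u]; none = KeyError (outside Pre_rec)

-- ===== PRECONDITION & SPEC =====
-- goodB k v is a SHAPE condition on the input graph, not a computation of either port (it
-- inspects only keys, emptiness and the -1 marker, never sums any values): v is at level
-- ≤ k of the DAG of unmemoised nodes — v is start, or a key of in_edges that is a leaf or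
-- memoised (with a dp entry), or v has in_edges and dp entries and every in-neighbour is
-- at a lower level.  goodB (#keys) u says: every node A's recursion reaches has the
-- dictionary entries it reads, and no cycle of unmemoised nodes is reachable.
def goodB (dp : List (Int × Int)) (ie : List (Int × List Int)) (start : Int) : Nat → Int → Bool
  | 0, v =>
    v == start ||
      ((PySem.Dict.ofList ie).contains v &&
        (((PySem.Dict.ofList ie).getD v []).length == 0 ||
          (match (PySem.Dict.ofList dp).get? v with
           | some w => w != -1
           | none => false)))
  | k+1, v =>
    goodB dp ie start k v ||
      ((PySem.Dict.ofList ie).contains v && (PySem.Dict.ofList dp).contains v &&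
        ((PySem.Dict.ofList ie).getD v []).all (goodB dp ie start k))

-- Pre_rec excludes exactly the inputs on which A does not return: it raises KeyError (a
-- node reached by the recursion missing from in_edges, or a reached non-leaf node missing
-- from dp) or recurses forever (a reachable cycle of unmemoised nodes).
def Pre_rec (dp : List (Int × Int)) (in_edges : List (Int × List Int)) (start : Int) (u : Int) : Prop :=
  goodB dp in_edges start (PySem.Dict.ofList in_edges).size u = true
instance (dp : List (Int × Int)) (in_edges : List (Int × List Int)) (start : Int) (u : Int) : Decidable (Pre_rec dp in_edges start u) := by unfold Pre_rec; infer_instance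

def pvWitness_rec : (List (Int × Int)) × (List (Int × List Int)) × Int × Int :=
  ([(1, -1)], [(1, [0])], 0, 1)

def Spec_rec (dp : List (Int × Int)) (in_edges : List (Int × List Int)) (start : Int) (u : Int) (out : Int) : Prop := out = rec_alt dp in_edges start u
instance (dp : List (Int × Int)) (in_edges : List (Int × List Int)) (start : Int) (u : Int) (out : Int) : Decidable (Spec_rec dp in_edges start u out) := by unfold Spec_rec; infer_instance

-- ===== CLAIM (what is proved, stated in full; the proofs are below) =====
def Claim_equal_rec : Prop := ∀ (dp : List (Int × Int)) (in_edges : List (Int × List Int)) (start : Int) (u : Int), Dom_rec dp in_edges start u → Pre_rec dp in_edges start u → Spec_rec dp in_edges start u (rec dp in_edges start u)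

-- ===== LEMMAS AND PROOFS =====

-- The ideal (memo-free) value of a node, computed from the ORIGINAL dp, with a depth
-- fuel; both ports are proved to return pvV at fuel NV1 + 1 on admitted inputs.
def NV1 (ie : List (Int × List Int)) : Nat := ie.length * ie.length + 1

mutual
def pvV (dp : List (Int × Int)) (ie : List (Int × List Int)) (start : Int) : Nat → Int → Int
  | 0, _ => 0
  | f+1, v =>
    if v = start then 1
    else
      match (PySem.Dict.ofList ie).get? v with
      | none => 0
      | some es =>
        if es.length = 0 then 0
        else
          match (PySem.Dict.ofList dp).get? v with
          | none => 0
          | some w => if w ≠ -1 then w else pvL dp ie start f es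
  termination_by f _ => (f, 0)
def pvL (dp : List (Int × Int)) (ie : List (Int × List Int)) (start : Int) : Nat → List Int → Int
  | _, [] => 0
  | f, v :: vs => pvV dp ie start f v + pvL dp ie start f vs
  termination_by f l => (f, l.length + 1)
end

def Vv (dp : List (Int × Int)) (ie : List (Int × List Int)) (start v : Int) : Int :=
  pvV dp ie start (NV1 ie + 1) v

-- finB k v: v's value is determined by the PORT within k levels (the settled probe
-- answers, or all in-neighbours are determined within k-1 levels).
def finB (dp : List (Int × Int)) (ie : List (Int × List Int)) (start : Int) : Nat → Int → Bool
  | 0, v => (settledB dp ie start v).isSome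
  | k+1, v => finB dp ie start k v || ((PySem.Dict.ofList ie).getD v []).all (finB dp ie start k)

theorem pvL_eq_sum (dp : List (Int × Int)) (ie : List (Int × List Int)) (start : Int)
    (f : Nat) (l : List Int) : pvL dp ie start f l = (l.map (pvV dp ie start f)).sum := by
  induction l with
  | nil => simp [pvL]
  | cons x xs ih => simp [pvL, ih]

theorem settled_none (dp : List (Int × Int)) (ie : List (Int × List Int)) (start v : Int)
    (h : settledB dp ie start v = none) :
    ¬ v = start ∧ ∃ es, (PySem.Dict.ofList ie).get? v = some es ∧ ¬ es.length = 0 ∧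
      (PySem.Dict.ofList dp).get? v = some (-1) := by
  simp only [settledB] at h
  by_cases h1 : v = start
  · rw [if_pos h1] at h; cases h
  · rw [if_neg h1] at h
    by_cases h2 : ((PySem.Dict.ofList ie).getD v []).length = 0
    · rw [if_pos h2] at h; cases h
    · rw [if_neg h2] at h
      by_cases h3 : (PySem.Dict.ofList dp).getD v 0 ≠ -1
      · rw [if_pos h3] at h; cases h
      · refine ⟨h1, ?_⟩
        cases hE : (PySem.Dict.ofList ie).get? v with
        | none =>
          exfalso
          rw [PySem.Dict.getD_eq_get?_getD, hE] at h2
          exact h2 rfl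
        | some es =>
          have hlen : ¬ es.length = 0 := by
            rw [PySem.Dict.getD_eq_get?_getD, hE] at h2; exact h2
          refine ⟨es, rfl, hlen, ?_⟩
          cases hD : (PySem.Dict.ofList dp).get? v with
          | none =>
            rw [PySem.Dict.getD_eq_get?_getD, hD] at h3
            simp at h3
          | some w =>
            have hgd : (PySem.Dict.ofList dp).getD v 0 = w := by
              rw [PySem.Dict.getD_eq_get?_getD, hD]; rfl
            rw [hgd] at h3
            simp at h3
            rw [h3]

theorem stab0 (dp : List (Int × Int)) (ie : List (Int × List Int)) (start v : Int)
    (h : finB dp ie start 0 v = true) (f : Nat) :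
    pvV dp ie start (f + 1) v = pvV dp ie start 1 v := by
  cases hsB : settledB dp ie start v with
  | none => rw [finB, hsB] at h; cases h
  | some r =>
    simp only [settledB] at hsB
    by_cases hs : v = start
    · simp [pvV, hs]
    · rw [if_neg hs] at hsB
      by_cases h2 : ((PySem.Dict.ofList ie).getD v []).length = 0
      · cases hE : (PySem.Dict.ofList ie).get? v with
        | none => simp [pvV, hs, hE]
        | some es =>
          have hlen : es.length = 0 := by
            rw [PySem.Dict.getD_eq_get?_getD, hE] at h2; exact h2
          simp [pvV, hs, hE, hlen]
      · rw [if_neg h2] at hsB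
        by_cases h3 : (PySem.Dict.ofList dp).getD v 0 ≠ -1
        · cases hE : (PySem.Dict.ofList ie).get? v with
          | none => simp [pvV, hs, hE]
          | some es =>
            have hlen : ¬ es.length = 0 := by
              rw [PySem.Dict.getD_eq_get?_getD, hE] at h2; exact h2
            cases hD : (PySem.Dict.ofList dp).get? v with
            | none => simp [pvV, hs, hE, hlen, hD]
            | some w =>
              have hgd : (PySem.Dict.ofList dp).getD v 0 = w := by
                rw [PySem.Dict.getD_eq_get?_getD, hD]; rfl
              rw [hgd] at h3
              simp [pvV, hs, hE, hlen, hD, h3]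
        · rw [if_neg h3] at hsB; cases hsB

theorem stab (dp : List (Int × Int)) (ie : List (Int × List Int)) (start : Int) :
    ∀ (k : Nat) (v : Int), finB dp ie start k v = true →
      ∀ f g, k < f → k < g → pvV dp ie start f v = pvV dp ie start g v := by
  intro k
  induction k with
  | zero =>
    intro v h f g hf hg
    obtain ⟨f', rfl⟩ : ∃ f', f = f' + 1 := ⟨f - 1, by omega⟩
    obtain ⟨g', rfl⟩ : ∃ g', g = g' + 1 := ⟨g - 1, by omega⟩
    rw [stab0 dp ie start v h f', stab0 dp ie start v h g']
  | succ k ih =>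
    intro v h f g hf hg
    simp only [finB, Bool.or_eq_true] at h
    rcases h with h | h
    · exact ih v h f g (by omega) (by omega)
    · obtain ⟨f', rfl⟩ : ∃ f', f = f' + 1 := ⟨f - 1, by omega⟩
      obtain ⟨g', rfl⟩ : ∃ g', g = g' + 1 := ⟨g - 1, by omega⟩
      by_cases hs : v = start
      · simp [pvV, hs]
      · cases hE : (PySem.Dict.ofList ie).get? v with
        | none => simp [pvV, hs, hE]
        | some es =>
          by_cases hlen : es.length = 0
          · simp [pvV, hs, hE, hlen]
          · cases hD : (PySem.Dict.ofList dp).get? v with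
            | none => simp [pvV, hs, hE, hD]
            | some w =>
              by_cases hw : w = -1
              · have hall : ∀ x ∈ es, finB dp ie start k x = true := by
                  have hg2 : (PySem.Dict.ofList ie).getD v [] = es := by
                    rw [PySem.Dict.getD_eq_get?_getD, hE]; rfl
                  rw [hg2] at h
                  simpa [List.all_eq_true] using h
                have hmap : ∀ x ∈ es, pvV dp ie start f' x = pvV dp ie start g' x :=
                  fun x hx => ih x (hall x hx) f' g' (by omega) (by omega)
                simp only [pvV]
                simp [hs, hE, hlen, hD, hw]
                rw [pvL_eq_sum, pvL_eq_sum, List.map_congr_left hmap]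
              · simp [pvV, hs, hE, hD, hw]

theorem finB_mono (dp : List (Int × Int)) (ie : List (Int × List Int)) (start : Int)
    {k m : Nat} (hkm : k ≤ m) {v : Int} (h : finB dp ie start k v = true) :
    finB dp ie start m v = true := by
  induction m with
  | zero => have : k = 0 := by omega
            simpa [this] using h
  | succ m ih =>
    rcases Nat.lt_or_ge k (m+1) with hlt | hge
    · have := ih (by omega)
      simp [finB, this]
    · have : k = m + 1 := by omega
      simpa [this] using h

theorem good_fin (dp : List (Int × Int)) (ie : List (Int × List Int)) (start : Int) :
    ∀ (k : Nat) (v : Int), goodB dp ie start k v = true → finB dp ie start k v = true := by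
  intro k
  induction k with
  | zero =>
    intro v h
    simp only [goodB, Bool.or_eq_true, Bool.and_eq_true] at h
    show (settledB dp ie start v).isSome = true
    rcases h with h | ⟨hc, h⟩
    · have hs : v = start := by simpa using h
      simp [settledB, hs]
    · by_cases hs : v = start
      · simp [settledB, hs]
      · rcases h with hl | hd
        · have hl' : ((PySem.Dict.ofList ie).getD v []).length = 0 := by simpa using hl
          simp [settledB, hs, hl']
        · cases hD : (PySem.Dict.ofList dp).get? v with
          | none => rw [hD] at hd; cases hd
          | some w =>
            rw [hD] at hd
            have hw : ¬ w = -1 := by simpa using hd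
            have hgd : (PySem.Dict.ofList dp).getD v 0 = w := by
              rw [PySem.Dict.getD_eq_get?_getD, hD]; rfl
            by_cases hl : ((PySem.Dict.ofList ie).getD v []).length = 0
            · simp [settledB, hs, hl]
            · simp [settledB, hs, hl, hgd, hw]
  | succ k ih =>
    intro v h
    simp only [goodB, Bool.or_eq_true, Bool.and_eq_true] at h
    rcases h with h | ⟨⟨_, _⟩, hall⟩
    · exact finB_mono dp ie start (Nat.le_succ k) (ih v h)
    · simp only [finB, Bool.or_eq_true]
      right
      rw [List.all_eq_true] at hall ⊢
      exact fun x hx => ih x (hall x hx)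

theorem le_sq_succ (n : Nat) : n ≤ n * n + 1 := by nlinarith

theorem size_ofList_le {κ ν : Type} [BEq κ] (l : List (κ × ν)) :
    (PySem.Dict.ofList l).size ≤ l.length := by
  have h : ∀ (t : List (κ × ν)) (d : PySem.Dict κ ν),
      (t.foldl (fun d p => d.insert p.1 p.2) d).size ≤ d.size + t.length := by
    intro t
    induction t with
    | nil => intro d; simp
    | cons p t ih =>
      intro d
      simp only [List.foldl_cons]
      have h1 := ih (d.insert p.1 p.2)
      have h2 := PySem.Dict.size_insert d p.1 p.2
      split at h2 <;> simp only [List.length_cons] <;> omega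
  have := h l PySem.Dict.empty
  simpa [PySem.Dict.ofList, PySem.Dict.update] using this

-- Branch-by-branch values of Vv.
theorem Vv_start (dp : List (Int × Int)) (ie : List (Int × List Int)) (start v : Int)
    (hs : v = start) : Vv dp ie start v = 1 := by simp [Vv, pvV, hs]

theorem Vv_nokey (dp : List (Int × Int)) (ie : List (Int × List Int)) (start v : Int)
    (hs : ¬ v = start) (hE : (PySem.Dict.ofList ie).get? v = none) : Vv dp ie start v = 0 := by
  simp [Vv, pvV, hs, hE]

theorem Vv_leaf (dp : List (Int × Int)) (ie : List (Int × List Int)) (start v : Int)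
    {es : List Int} (hs : ¬ v = start) (hE : (PySem.Dict.ofList ie).get? v = some es)
    (hlen : es.length = 0) : Vv dp ie start v = 0 := by
  simp [Vv, pvV, hs, hE, hlen]

theorem Vv_dpnone (dp : List (Int × Int)) (ie : List (Int × List Int)) (start v : Int)
    {es : List Int} (hs : ¬ v = start) (hE : (PySem.Dict.ofList ie).get? v = some es)
    (hlen : ¬ es.length = 0) (hD : (PySem.Dict.ofList dp).get? v = none) :
    Vv dp ie start v = 0 := by
  simp [Vv, pvV, hs, hE, hlen, hD]

theorem Vv_memo (dp : List (Int × Int)) (ie : List (Int × List Int)) (start v : Int)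
    {es : List Int} {w : Int} (hs : ¬ v = start) (hE : (PySem.Dict.ofList ie).get? v = some es)
    (hlen : ¬ es.length = 0) (hD : (PySem.Dict.ofList dp).get? v = some w) (hw : ¬ w = -1) :
    Vv dp ie start v = w := by
  simp [Vv, pvV, hs, hE, hlen, hD, hw]

theorem Vv_rec (dp : List (Int × Int)) (ie : List (Int × List Int)) (start v : Int)
    {es : List Int} (hs : ¬ v = start) (hE : (PySem.Dict.ofList ie).get? v = some es)
    (hlen : ¬ es.length = 0) (hD : (PySem.Dict.ofList dp).get? v = some (-1)) :
    Vv dp ie start v = pvL dp ie start (NV1 ie) es := by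
  simp [Vv, pvV, hs, hE, hlen, hD]

-- ===== A-side: the memoised recursion returns Vv =====
def invA (dp : List (Int × Int)) (ie : List (Int × List Int)) (start : Int)
    (d : PySem.Dict Int Int) : Prop :=
  (∀ v w, d.get? v = some w →
      (PySem.Dict.ofList dp).get? v = some w ∨ w = Vv dp ie start v)
  ∧ ∀ v, ((PySem.Dict.ofList dp).get? v).isSome → (d.get? v).isSome

theorem invA_init (dp : List (Int × Int)) (ie : List (Int × List Int)) (start : Int) :
    invA dp ie start (PySem.Dict.ofList dp) := by
  constructor
  · intro v w h; exact Or.inl h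
  · intro v h; exact h

theorem invA_insert {dp : List (Int × Int)} {ie : List (Int × List Int)} {start : Int}
    {d : PySem.Dict Int Int} (h : invA dp ie start d) {v x : Int}
    (hx : x = Vv dp ie start v) : invA dp ie start (d.insert v x) := by
  constructor
  · intro v' w hw
    rw [PySem.Dict.get?_insert] at hw
    split at hw
    · rename_i hv; right
      rw [Option.some.injEq] at hw
      rw [← hw, hx, hv]
    · exact h.1 v' w hw
  · intro v' hsome
    rw [PySem.Dict.get?_insert]
    split
    · simp
    · exact h.2 v' hsome

theorem memo_neg {dp : List (Int × Int)} {ie : List (Int × List Int)} {start : Int}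
    {d : PySem.Dict Int Int} (h : invA dp ie start d) {u : Int} {es : List Int}
    (hd : d.get? u = some (-1)) (hs : ¬ u = start)
    (hE : (PySem.Dict.ofList ie).get? u = some es) (hlen : ¬ es.length = 0) :
    (PySem.Dict.ofList dp).get? u = some (-1) := by
  rcases h.1 u (-1) hd with h0 | h0
  · exact h0
  · cases hD : (PySem.Dict.ofList dp).get? u with
    | none =>
      rw [Vv_dpnone dp ie start u hs hE hlen hD] at h0
      exact absurd h0 (by decide)
    | some w =>
      by_cases hw : w = -1
      · rw [hw]
      · rw [Vv_memo dp ie start u hs hE hlen hD hw] at h0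
        rw [← h0]

theorem settled_none_of_branches {dp : List (Int × Int)} {ie : List (Int × List Int)}
    {start u : Int} {es : List Int} (hs : ¬ u = start)
    (hE : (PySem.Dict.ofList ie).get? u = some es) (hlen : ¬ es.length = 0)
    (hD : (PySem.Dict.ofList dp).get? u = some (-1)) :
    settledB dp ie start u = none := by
  have hg : (PySem.Dict.ofList ie).getD u [] = es := by
    rw [PySem.Dict.getD_eq_get?_getD, hE]; rfl
  have hgd : (PySem.Dict.ofList dp).getD u 0 = -1 := by
    rw [PySem.Dict.getD_eq_get?_getD, hD]; rfl
  simp [settledB, hs, hg, hlen, hgd]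

theorem foldA (dp : List (Int × Int)) (ie : List (Int × List Int)) (start : Int)
    (k fuel : Nat)
    (hrec : ∀ (u : Int) (d : PySem.Dict Int Int), finB dp ie start k u = true →
      invA dp ie start d →
      (recA ie start fuel d u).2 = Vv dp ie start u ∧
        invA dp ie start (recA ie start fuel d u).1) :
    ∀ (es : List Int) (d : PySem.Dict Int Int) (acc : Int),
      (∀ v ∈ es, finB dp ie start k v = true) → invA dp ie start d →
      (es.foldl (fun (p : PySem.Dict Int Int × Int) v =>
          ((recA ie start fuel p.1 v).1, p.2 + (recA ie start fuel p.1 v).2)) (d, acc)).2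
        = acc + (es.map (Vv dp ie start)).sum
      ∧ invA dp ie start
          (es.foldl (fun (p : PySem.Dict Int Int × Int) v =>
            ((recA ie start fuel p.1 v).1, p.2 + (recA ie start fuel p.1 v).2)) (d, acc)).1 := by
  intro es
  induction es with
  | nil => intro d acc _ hinv; exact ⟨by simp, hinv⟩
  | cons v vs ih =>
    intro d acc hall hinv
    obtain ⟨hv2, hinv1⟩ := hrec v d (hall v (List.mem_cons_self)) hinv
    simp only [List.foldl_cons]
    have := ih (recA ie start fuel d v).1 (acc + (recA ie start fuel d v).2)
      (fun x hx => hall x (List.mem_cons_of_mem _ hx)) hinv1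
    refine ⟨?_, this.2⟩
    rw [this.1, hv2]
    simp only [List.map_cons, List.sum_cons]
    ring

theorem Amain (dp : List (Int × Int)) (ie : List (Int × List Int)) (start : Int) :
    ∀ (k : Nat), k ≤ ie.length → ∀ (fuel : Nat), k < fuel →
      ∀ (u : Int) (d : PySem.Dict Int Int), finB dp ie start k u = true →
        invA dp ie start d →
        (recA ie start fuel d u).2 = Vv dp ie start u ∧
          invA dp ie start (recA ie start fuel d u).1 := by
  intro k
  induction k with
  | zero =>
    intro hk fuel hfuel u d hu hinv
    obtain ⟨f, rfl⟩ : ∃ f, fuel = f + 1 := ⟨fuel - 1, by omega⟩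
    by_cases hs : u = start
    · simp only [recA, if_pos hs]
      exact ⟨(Vv_start dp ie start u hs).symm,
        invA_insert hinv (Vv_start dp ie start u hs).symm⟩
    · cases hE : (PySem.Dict.ofList ie).get? u with
      | none =>
        simp only [recA, if_neg hs, hE]
        exact ⟨(Vv_nokey dp ie start u hs hE).symm, hinv⟩
      | some es =>
        by_cases hlen : es.length = 0
        · simp only [recA, if_neg hs, hE, if_pos hlen]
          exact ⟨(Vv_leaf dp ie start u hs hE hlen).symm,
            invA_insert hinv (Vv_leaf dp ie start u hs hE hlen).symm⟩
        · cases hD : d.get? u with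
          | none =>
            have hD0 : (PySem.Dict.ofList dp).get? u = none := by
              cases hD0 : (PySem.Dict.ofList dp).get? u with
              | none => rfl
              | some w =>
                have := hinv.2 u (by rw [hD0]; rfl)
                rw [hD] at this
                cases this
            simp only [recA, if_neg hs, hE, if_neg hlen, hD]
            exact ⟨(Vv_dpnone dp ie start u hs hE hlen hD0).symm, hinv⟩
          | some w =>
            by_cases hw : w = -1
            · exfalso
              subst hw
              have hD0 := memo_neg hinv hD hs hE hlen
              have hsB := settled_none_of_branches hs hE hlen hD0
              rw [finB, hsB] at hu
              cases hu
            · simp only [recA, if_neg hs, hE, if_neg hlen, hD, if_pos hw]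
              refine ⟨?_, hinv⟩
              rcases hinv.1 u w hD with h0 | h0
              · exact (Vv_memo dp ie start u hs hE hlen h0 hw).symm
              · exact h0
  | succ k ih =>
    intro hk fuel hfuel u d hu hinv
    simp only [finB, Bool.or_eq_true] at hu
    rcases hu with hu | hall
    · exact ih (by omega) fuel (by omega) u d hu hinv
    · obtain ⟨f, rfl⟩ : ∃ f, fuel = f + 1 := ⟨fuel - 1, by omega⟩
      by_cases hs : u = start
      · simp only [recA, if_pos hs]
        exact ⟨(Vv_start dp ie start u hs).symm,
          invA_insert hinv (Vv_start dp ie start u hs).symm⟩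
      · cases hE : (PySem.Dict.ofList ie).get? u with
        | none =>
          simp only [recA, if_neg hs, hE]
          exact ⟨(Vv_nokey dp ie start u hs hE).symm, hinv⟩
        | some es =>
          by_cases hlen : es.length = 0
          · simp only [recA, if_neg hs, hE, if_pos hlen]
            exact ⟨(Vv_leaf dp ie start u hs hE hlen).symm,
              invA_insert hinv (Vv_leaf dp ie start u hs hE hlen).symm⟩
          · cases hD : d.get? u with
            | none =>
              have hD0 : (PySem.Dict.ofList dp).get? u = none := by
                cases hD0 : (PySem.Dict.ofList dp).get? u with
                | none => rfl
                | some w =>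
                  have := hinv.2 u (by rw [hD0]; rfl)
                  rw [hD] at this
                  cases this
              simp only [recA, if_neg hs, hE, if_neg hlen, hD]
              exact ⟨(Vv_dpnone dp ie start u hs hE hlen hD0).symm, hinv⟩
            | some w =>
              by_cases hw : w = -1
              · subst hw
                have hD0 := memo_neg hinv hD hs hE hlen
                have hg : (PySem.Dict.ofList ie).getD u [] = es := by
                  rw [PySem.Dict.getD_eq_get?_getD, hE]; rfl
                have hch : ∀ v ∈ es, finB dp ie start k v = true := by
                  rw [hg] at hall
                  simpa [List.all_eq_true] using hall
                have hfold := foldA dp ie start k f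
                  (fun u' d' hu' hd' => ih (by omega) f (by omega) u' d' hu' hd')
                  es d 0 hch hinv
                have hVu : Vv dp ie start u = (es.map (Vv dp ie start)).sum := by
                  rw [Vv_rec dp ie start u hs hE hlen hD0, pvL_eq_sum]
                  refine congrArg List.sum (List.map_congr_left ?_)
                  intro x hx
                  have hle := le_sq_succ ie.length
                  exact stab dp ie start k x (hch x hx) (NV1 ie) (NV1 ie + 1)
                    (by unfold NV1; omega) (by unfold NV1; omega)
                have hr2 : (es.foldl (fun (p : PySem.Dict Int Int × Int) v =>
                    ((recA ie start f p.1 v).1, p.2 + (recA ie start f p.1 v).2)) (d, 0)).2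
                    = Vv dp ie start u := by
                  rw [hfold.1, hVu]
                  ring
                simp only [recA, if_neg hs, hE, if_neg hlen, hD,
                  if_neg (by simp : ¬((-1 : Int) ≠ -1))]
                exact ⟨hr2, invA_insert hfold.2 hr2⟩
              · simp only [recA, if_neg hs, hE, if_neg hlen, hD, if_pos hw]
                refine ⟨?_, hinv⟩
                rcases hinv.1 u w hD with h0 | h0
                · exact (Vv_memo dp ie start u hs hE hlen h0 hw).symm
                · exact h0

-- ===== B-side: the fixed-point iteration returns Vv =====
theorem settled_some_V {dp : List (Int × Int)} {ie : List (Int × List Int)} {start v r : Int}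
    (h : settledB dp ie start v = some r) : r = Vv dp ie start v := by
  simp only [settledB] at h
  split_ifs at h with h1 h2 h3
  · rw [(Option.some.inj h).symm, Vv_start dp ie start v h1]
  · rw [(Option.some.inj h).symm]
    cases hE : (PySem.Dict.ofList ie).get? v with
    | none => rw [Vv_nokey dp ie start v h1 hE]
    | some es =>
      have hlen : es.length = 0 := by
        rw [PySem.Dict.getD_eq_get?_getD, hE] at h2; exact h2
      rw [Vv_leaf dp ie start v h1 hE hlen]
  · rw [(Option.some.inj h).symm]
    cases hE : (PySem.Dict.ofList ie).get? v with
    | none =>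
      exfalso
      rw [PySem.Dict.getD_eq_get?_getD, hE] at h2
      exact h2 rfl
    | some es =>
      have hlen : ¬ es.length = 0 := by
        rw [PySem.Dict.getD_eq_get?_getD, hE] at h2; exact h2
      cases hD : (PySem.Dict.ofList dp).get? v with
      | none =>
        rw [PySem.Dict.getD_eq_get?_getD, hD]
        rw [Vv_dpnone dp ie start v h1 hE hlen hD]
        rfl
      | some w =>
        have hgd : (PySem.Dict.ofList dp).getD v 0 = w := by
          rw [PySem.Dict.getD_eq_get?_getD, hD]; rfl
        rw [hgd]
        rw [hgd] at h3
        rw [Vv_memo dp ie start v h1 hE hlen hD h3]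

theorem settled_some_fin0 {dp : List (Int × Int)} {ie : List (Int × List Int)} {start v : Int}
    (h : (settledB dp ie start v).isSome = true) : finB dp ie start 0 v = true := h

-- invariants of the value table
def invB (dp : List (Int × Int)) (ie : List (Int × List Int)) (start : Int) (j : Nat)
    (val : PySem.Dict Int Int) : Prop :=
  ∀ v w, val.get? v = some w → w = Vv dp ie start v ∧ finB dp ie start j v = true

def invU (dp : List (Int × Int)) (ie : List (Int × List Int)) (start : Int)
    (val : PySem.Dict Int Int) : Prop :=
  ∀ v, val.contains v = true → settledB dp ie start v = none

def subD (val val' : PySem.Dict Int Int) : Prop :=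
  ∀ v w, val.get? v = some w → val'.get? v = some w

def complG (dp : List (Int × Int)) (ie : List (Int × List Int)) (start : Int)
    (j : Nat) (val : PySem.Dict Int Int) : Prop :=
  ∀ v, goodB dp ie start j v = true → (knownB dp ie start val v).isSome = true

theorem known_of_sub {dp : List (Int × Int)} {ie : List (Int × List Int)} {start : Int}
    {val val' : PySem.Dict Int Int} (hsub : subD val val')
    (hU' : invU dp ie start val') {v x : Int}
    (hk : knownB dp ie start val v = some x) : knownB dp ie start val' v = some x := by
  unfold knownB at hk ⊢
  by_cases hc : val.contains v = true
  · rw [if_pos hc] at hk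
    have := hsub v x hk
    have hc' : val'.contains v = true := by
      rw [PySem.Dict.contains_eq_isSome_get?, this]; rfl
    rw [if_pos hc', this]
  · rw [if_neg hc] at hk
    by_cases hc' : val'.contains v = true
    · exact absurd (hU' v hc') (by rw [hk]; exact Option.some_ne_none x)
    · rw [if_neg hc']; exact hk

theorem filterMap_all_some {α β : Type} (f : α → Option β) (g : α → β) (l : List α)
    (h : ∀ x ∈ l, f x = some (g x)) : l.filterMap f = l.map g := by
  induction l with
  | nil => rfl
  | cons x xs ih =>
    have hx := h x (List.mem_cons_self)
    simp [hx, ih (fun y hy => h y (List.mem_cons_of_mem _ hy))]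

def stepB (dp : List (Int × Int)) (ie : List (Int × List Int)) (start : Int)
    (val : PySem.Dict Int Int) (p : Int × List Int) : PySem.Dict Int Int :=
  if val.contains p.1 || (settledB dp ie start p.1).isSome then val
  else if (p.2.map (knownB dp ie start val)).contains none then val
  else val.insert p.1 ((p.2.map (knownB dp ie start val)).filterMap id).sum

theorem roundB_eq_foldl_stepB (dp : List (Int × Int)) (ie : List (Int × List Int))
    (start : Int) (val : PySem.Dict Int Int) :
    roundB dp ie start val = (PySem.Dict.ofList ie).items.foldl (stepB dp ie start) val := rfl

theorem stepB_sub {dp : List (Int × Int)} {ie : List (Int × List Int)} {start : Int}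
    (val : PySem.Dict Int Int) (p : Int × List Int) :
    subD val (stepB dp ie start val p) := by
  intro v w hw
  unfold stepB
  split
  · exact hw
  · split
    · exact hw
    · rw [PySem.Dict.get?_insert]
      split
      · rename_i hv
        exfalso
        rename_i hg _
        have : val.contains p.1 = true := by
          rw [PySem.Dict.contains_eq_isSome_get?, ← hv, hw]; rfl
        simp [this] at hg
      · exact hw

theorem stepB_invU {dp : List (Int × Int)} {ie : List (Int × List Int)} {start : Int}
    {val : PySem.Dict Int Int} (hU : invU dp ie start val) (p : Int × List Int) :
    invU dp ie start (stepB dp ie start val p) := by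
  intro v hv
  unfold stepB at hv
  split at hv
  · exact hU v hv
  · rename_i hg
    split at hv
    · exact hU v hv
    · rw [PySem.Dict.contains_insert] at hv
      rcases Bool.or_eq_true_iff.mp hv with he | he
      · have hveq : v = p.1 := by simpa using he
        rw [hveq]
        cases hsB : settledB dp ie start p.1 with
        | none => rfl
        | some r => rw [hsB] at hg; simp at hg
      · exact hU v he

theorem subD_refl (val : PySem.Dict Int Int) : subD val val := fun _ _ h => h

theorem subD_trans {a b c : PySem.Dict Int Int} (h1 : subD a b) (h2 : subD b c) : subD a c :=
  fun v w hw => h2 v w (h1 v w hw)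

theorem contains_of_subD {val val' : PySem.Dict Int Int} (hsub : subD val val') {x : Int}
    (h : val.contains x = true) : val'.contains x = true := by
  rw [PySem.Dict.contains_eq_isSome_get?] at h
  cases hx : val.get? x with
  | none => rw [hx] at h; cases h
  | some w => rw [PySem.Dict.contains_eq_isSome_get?, hsub x w hx]; rfl

theorem foldl_stepB_sub (dp : List (Int × Int)) (ie : List (Int × List Int)) (start : Int) :
    ∀ (l : List (Int × List Int)) (val : PySem.Dict Int Int),
      subD val (l.foldl (stepB dp ie start) val) := by
  intro l
  induction l with
  | nil => intro val; exact subD_refl val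
  | cons q l ih =>
    intro val
    simp only [List.foldl_cons]
    exact subD_trans (stepB_sub val q) (ih _)

theorem foldl_stepB_invU (dp : List (Int × Int)) (ie : List (Int × List Int)) (start : Int) :
    ∀ (l : List (Int × List Int)) (val : PySem.Dict Int Int), invU dp ie start val →
      invU dp ie start (l.foldl (stepB dp ie start) val) := by
  intro l
  induction l with
  | nil => intro val h; exact h
  | cons q l ih =>
    intro val h
    simp only [List.foldl_cons]
    exact ih _ (stepB_invU h q)

theorem stepB_invB {dp : List (Int × Int)} {ie : List (Int × List Int)} {start : Int}
    {j : Nat} (hj : j < NV1 ie) {val : PySem.Dict Int Int}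
    (hB : invB dp ie start j val) {p : Int × List Int}
    (hp : p ∈ (PySem.Dict.ofList ie).items) :
    invB dp ie start (j + 1) (stepB dp ie start val p) := by
  have hmono : ∀ v w, val.get? v = some w →
      w = Vv dp ie start v ∧ finB dp ie start (j + 1) v = true := by
    intro v w hw
    obtain ⟨h1, h2⟩ := hB v w hw
    exact ⟨h1, finB_mono dp ie start (Nat.le_succ j) h2⟩
  intro v w hw
  unfold stepB at hw
  split at hw
  · exact hmono v w hw
  · rename_i hg
    split at hw
    · exact hmono v w hw
    · rename_i hn
      rw [PySem.Dict.get?_insert] at hw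
      split at hw
      · rename_i hv
        have hs : settledB dp ie start p.1 = none := by
          cases hsB : settledB dp ie start p.1 with
          | none => rfl
          | some r => rw [hsB] at hg; simp at hg
        obtain ⟨hvs, es, hE, hlen, hD⟩ := settled_none dp ie start p.1 hs
        have hEp : (PySem.Dict.ofList ie).get? p.1 = some p.2 :=
          PySem.Dict.get?_of_mem_items _ hp (PySem.Dict.nodup_keys_ofList ie)
        have hes : es = p.2 := by
          rw [hEp] at hE
          exact (Option.some.inj hE).symm
        rw [hes] at hlen
        -- every child is known and carries a value Vv with a level ≤ j
        have hkv : ∀ x ∈ p.2, knownB dp ie start val x = some (Vv dp ie start x) ∧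
            finB dp ie start j x = true := by
          intro x hx
          have hxne : knownB dp ie start val x ≠ none := by
            intro h0
            have : none ∈ p.2.map (knownB dp ie start val) := List.mem_map.mpr ⟨x, hx, h0⟩
            rw [List.contains_eq_mem] at hn
            exact hn (decide_eq_true this)
          cases hky : knownB dp ie start val x with
          | none => exact absurd hky hxne
          | some y =>
            have hky' := hky
            unfold knownB at hky'
            by_cases hcx : val.contains x = true
            · rw [if_pos hcx] at hky'
              obtain ⟨h1, h2⟩ := hB x y hky'
              subst h1
              exact ⟨rfl, h2⟩
            · rw [if_neg hcx] at hky'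
              have hyv : y = Vv dp ie start x := settled_some_V hky'
              subst hyv
              exact ⟨rfl, finB_mono dp ie start (Nat.zero_le j)
                (settled_some_fin0 (by rw [hky']; rfl))⟩
        have hsum : ((p.2.map (knownB dp ie start val)).filterMap id).sum
            = (p.2.map (Vv dp ie start)).sum := by
          rw [List.filterMap_map]
          have hcmp : (id ∘ knownB dp ie start val) = knownB dp ie start val := rfl
          rw [hcmp, filterMap_all_some (knownB dp ie start val) (Vv dp ie start) p.2
            (fun x hx => (hkv x hx).1)]
        have hVp : Vv dp ie start p.1 = (p.2.map (Vv dp ie start)).sum := by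
          rw [Vv_rec dp ie start p.1 hvs hEp hlen hD, pvL_eq_sum]
          refine congrArg List.sum (List.map_congr_left ?_)
          intro x hx
          exact stab dp ie start j x (hkv x hx).2 (NV1 ie) (NV1 ie + 1)
            (by omega) (by omega)
        have hfp : finB dp ie start (j + 1) p.1 = true := by
          have hg2 : (PySem.Dict.ofList ie).getD p.1 [] = p.2 := by
            rw [PySem.Dict.getD_eq_get?_getD, hEp]; rfl
          simp only [finB, Bool.or_eq_true]
          right
          rw [hg2, List.all_eq_true]
          exact fun x hx => (hkv x hx).2
        refine ⟨?_, by rw [hv]; exact hfp⟩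
        rw [hv, ← Option.some.inj hw, hsum, hVp]
      · exact hmono v w hw

theorem foldl_stepB_invB {dp : List (Int × Int)} {ie : List (Int × List Int)} {start : Int} :
    ∀ (l : List (Int × List Int)), (∀ q ∈ l, q ∈ (PySem.Dict.ofList ie).items) →
      ∀ (j : Nat), j + l.length ≤ ie.length * ie.length →
      ∀ (val : PySem.Dict Int Int), invB dp ie start j val →
        invB dp ie start (j + l.length) (l.foldl (stepB dp ie start) val) := by
  intro l
  induction l with
  | nil => intro _ j _ val hB; simpa using hB
  | cons q l ih =>
    intro hmem j hj val hB
    simp only [List.foldl_cons, List.length_cons]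
    have h1 := stepB_invB (start := start) (by unfold NV1; omega) hB
      (hmem q (List.mem_cons_self))
    have := ih (fun r hr => hmem r (List.mem_cons_of_mem _ hr)) (j + 1)
      (by simp at hj; omega) _ h1
    simpa [Nat.add_assoc, Nat.add_comm 1 l.length] using this

-- completeness: after one more round every node good one level deeper is known
theorem fold_contains (dp : List (Int × Int)) (ie : List (Int × List Int)) (start : Int)
    (k : Nat) (val₀ : PySem.Dict Int Int) (hc : complG dp ie start k val₀)
    (p : Int × List Int) (hch : ∀ x ∈ p.2, goodB dp ie start k x = true)
    (hs : settledB dp ie start p.1 = none) :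
    ∀ (l : List (Int × List Int)) (val : PySem.Dict Int Int), p ∈ l → subD val₀ val →
      invU dp ie start val →
      (l.foldl (stepB dp ie start) val).contains p.1 = true := by
  intro l
  induction l with
  | nil => intro val hp _ _; cases hp
  | cons q l ih =>
    intro val hp hsub hU
    simp only [List.foldl_cons]
    have hsub1 := stepB_sub (dp := dp) (ie := ie) (start := start) val q
    have hU1 := stepB_invU hU q
    rcases List.mem_cons.mp hp with rfl | hp'
    · have hcont : (stepB dp ie start val p).contains p.1 = true := by
        by_cases h1 : val.contains p.1 = true
        · exact contains_of_subD hsub1 h1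
        · have h1' : val.contains p.1 = false := by
            cases hcv : val.contains p.1
            · rfl
            · exact absurd hcv h1
          have hnone : ((p.2.map (knownB dp ie start val)).contains none) = false := by
            simp only [List.contains_eq_mem, decide_eq_false_iff_not]
            intro h0
            obtain ⟨x, hx, hxeq⟩ := List.mem_map.mp h0
            obtain ⟨y, hy⟩ := Option.isSome_iff_exists.mp (hc x (hch x hx))
            have := known_of_sub hsub hU hy
            rw [this] at hxeq
            cases hxeq
          unfold stepB
          rw [h1']
          simp only [hs, Option.isSome_none, Bool.or_false, Bool.false_eq_true,
            if_false, hnone]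
          exact PySem.Dict.contains_insert_self _ _ _
      exact contains_of_subD (foldl_stepB_sub dp ie start l _) hcont
    · exact ih (stepB dp ie start val q) hp' (subD_trans hsub hsub1) hU1

theorem known_isSome {dp : List (Int × Int)} {ie : List (Int × List Int)} {start v : Int}
    (hset : (settledB dp ie start v).isSome = true) (val : PySem.Dict Int Int) :
    (knownB dp ie start val v).isSome = true := by
  unfold knownB
  by_cases hc : val.contains v = true
  · rw [if_pos hc, ← PySem.Dict.contains_eq_isSome_get?]
    exact hc
  · rw [if_neg hc]
    exact hset

theorem compl_zero (dp : List (Int × Int)) (ie : List (Int × List Int)) (start : Int)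
    (val : PySem.Dict Int Int) : complG dp ie start 0 val :=
  fun v hv => known_isSome (good_fin dp ie start 0 v hv) val

theorem round_compl {dp : List (Int × Int)} {ie : List (Int × List Int)} {start : Int}
    (k : Nat) {val : PySem.Dict Int Int} (hc : complG dp ie start k val)
    (hU : invU dp ie start val) :
    complG dp ie start (k + 1) (roundB dp ie start val) := by
  intro v hv
  rw [roundB_eq_foldl_stepB]
  cases hk : goodB dp ie start k v with
  | true =>
    obtain ⟨x, hx⟩ := Option.isSome_iff_exists.mp (hc v hk)
    have := known_of_sub (foldl_stepB_sub dp ie start (PySem.Dict.ofList ie).items val)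
      (foldl_stepB_invU dp ie start (PySem.Dict.ofList ie).items val hU) hx
    rw [this]; rfl
  | false =>
    simp only [goodB, Bool.or_eq_true, Bool.and_eq_true] at hv
    rcases hv with hv | ⟨⟨hcie, _⟩, hall⟩
    · rw [hk] at hv; cases hv
    · cases hsB : settledB dp ie start v with
      | some r => exact known_isSome (by rw [hsB]; rfl) _
      | none =>
        obtain ⟨hvs, es, hE, hlen, hD⟩ := settled_none dp ie start v hsB
        have hp : (v, es) ∈ (PySem.Dict.ofList ie).items :=
          PySem.Dict.mem_items_of_get?_eq_some _ hE
        have hg : (PySem.Dict.ofList ie).getD v [] = es := by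
          rw [PySem.Dict.getD_eq_get?_getD, hE]; rfl
        have hch : ∀ x ∈ es, goodB dp ie start k x = true := by
          rw [hg, List.all_eq_true] at hall
          exact hall
        have hcont := fold_contains dp ie start k val hc (v, es) hch hsB
          (PySem.Dict.ofList ie).items val hp (subD_refl val) hU
        unfold knownB
        rw [if_pos hcont, ← PySem.Dict.contains_eq_isSome_get?]
        exact hcont

def iterR (dp : List (Int × Int)) (ie : List (Int × List Int)) (start : Int) (j : Nat) :
    PySem.Dict Int Int :=
  (List.range j).foldl (fun val _ => roundB dp ie start val) PySem.Dict.empty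

theorem iterR_succ (dp : List (Int × Int)) (ie : List (Int × List Int)) (start : Int)
    (j : Nat) : iterR dp ie start (j + 1) = roundB dp ie start (iterR dp ie start j) := by
  unfold iterR
  rw [List.range_succ, List.foldl_append]
  rfl

theorem iterR_good (dp : List (Int × Int)) (ie : List (Int × List Int)) (start : Int) :
    ∀ r, r ≤ (PySem.Dict.ofList ie).size →
      invB dp ie start (r * (PySem.Dict.ofList ie).size) (iterR dp ie start r) ∧
      invU dp ie start (iterR dp ie start r) ∧
      complG dp ie start r (iterR dp ie start r) := by
  have hL : (PySem.Dict.ofList ie).size ≤ ie.length := size_ofList_le ie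
  have hlen : (PySem.Dict.ofList ie).items.length = (PySem.Dict.ofList ie).size := rfl
  intro r
  induction r with
  | zero =>
    intro _
    refine ⟨?_, ?_, compl_zero dp ie start _⟩
    · intro v w hw
      rw [show iterR dp ie start 0 = PySem.Dict.empty from rfl] at hw
      rw [PySem.Dict.get?_empty] at hw
      cases hw
    · intro v hv
      rw [show iterR dp ie start 0 = PySem.Dict.empty from rfl] at hv
      rw [PySem.Dict.contains_empty] at hv
      cases hv
  | succ r ih =>
    intro hr
    obtain ⟨hB, hU, hc⟩ := ih (by omega)
    rw [iterR_succ]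
    refine ⟨?_, ?_, round_compl r hc hU⟩
    · rw [roundB_eq_foldl_stepB]
      have hbound : r * (PySem.Dict.ofList ie).size + (PySem.Dict.ofList ie).items.length
          ≤ ie.length * ie.length := by
        rw [hlen]
        calc r * (PySem.Dict.ofList ie).size + (PySem.Dict.ofList ie).size
            = (r + 1) * (PySem.Dict.ofList ie).size := by ring
          _ ≤ ie.length * ie.length :=
            Nat.mul_le_mul (le_trans hr hL) hL
      have := foldl_stepB_invB (start := start) (PySem.Dict.ofList ie).items
        (fun q hq => hq) (r * (PySem.Dict.ofList ie).size) hbound _ hB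
      rw [hlen] at this
      have heq : r * (PySem.Dict.ofList ie).size + (PySem.Dict.ofList ie).size
          = (r + 1) * (PySem.Dict.ofList ie).size := by ring
      rw [heq] at this
      exact this
    · rw [roundB_eq_foldl_stepB]
      exact foldl_stepB_invU dp ie start _ _ hU

-- ===== VERDICT (by name: the statement is the Claim_ definition above) =====
theorem rec_spec : Claim_equal_rec := by
  intro dp ie start u hdom hpre
  unfold Spec_rec
  unfold Pre_rec at hpre
  have hL : (PySem.Dict.ofList ie).size ≤ ie.length := size_ofList_le ie
  have hfu : finB dp ie start (PySem.Dict.ofList ie).size u = true :=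
    good_fin dp ie start _ u hpre
  have hA : rec dp ie start u = Vv dp ie start u := by
    unfold rec
    exact (Amain dp ie start (PySem.Dict.ofList ie).size hL (ie.length + 1) (by omega) u
      (PySem.Dict.ofList dp) hfu (invA_init dp ie start)).1
  obtain ⟨hB, hU, hc⟩ := iterR_good dp ie start (PySem.Dict.ofList ie).size le_rfl
  have hBv : rec_alt dp ie start u = Vv dp ie start u := by
    unfold rec_alt
    by_cases hs : u = start
    · simp only [hs]
      exact (Vv_start dp ie start start rfl).symm
    · cases hE : (PySem.Dict.ofList ie).get? u with
      | none => simp [hs, Vv_nokey dp ie start u hs hE]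
      | some es =>
        by_cases hlen : es.length = 0
        · simp [hs, hlen, Vv_leaf dp ie start u hs hE hlen]
        · cases hD : (PySem.Dict.ofList dp).get? u with
          | none => simp [hs, hlen, Vv_dpnone dp ie start u hs hE hlen hD]
          | some w =>
            by_cases hw : w = -1
            · subst hw
              have hsB := settled_none_of_branches hs hE hlen hD
              have hkn := hc u hpre
              unfold knownB at hkn
              by_cases hcu : (iterR dp ie start (PySem.Dict.ofList ie).size).contains u = true
              · rw [if_pos hcu] at hkn
                obtain ⟨x, hwv⟩ := Option.isSome_iff_exists.mp hkn
                have hwV := (hB u x hwv).1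
                simp only [hs, hlen, if_neg (by simp : ¬((-1 : Int) ≠ -1))]
                show ((iterR dp ie start (PySem.Dict.ofList ie).size).get? u).getD 0
                  = Vv dp ie start u
                rw [hwv]
                exact hwV
              · rw [if_neg hcu, hsB] at hkn
                cases hkn
            · simp [hs, hlen, hw, Vv_memo dp ie start u hs hE hlen hD hw]
  rw [hA, hBv]
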